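-- pv_equiv track=rewrite | github.com/hann0079/coding-test-study | Python3/프로그래머스/2/42584. 주식가격/주식가격.py | solution
-- ===== SOURCE A (Python) =====
-- def solution(prices):
--     n = len(prices)
--     stack = []
--     answer = [0] * n
--
--     for i in range(n):
--         while stack and prices[i] < prices[stack[-1]]:
--             v = stack.pop()
--             answer[v] = i - v
--         stack.append(i)
--
--     while stack:
--         v = stack.pop()
--         answer[v] = n - 1 - v
--
--     return answer
-- ===== SOURCE B (Python) =====
-- def solution(prices):
--     n = len(prices)
--
--     def first_drop(i):
--         j = i + 1
--         while j < n:
--             if prices[j] < prices[i]: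
--                 return j
--             j += 1
--         return None
--
--     answer = []
--     for i in range(n):
--         j = first_drop(i)
--         answer.append(j - i if j is not None else n - 1 - i)
--     return answer
-- ===== Notes on version B (the rewrite author's own statement) =====
-- stated objective: simpler
-- what changed: Replaced the monotonic index stack with a direct per-index forward scan: for each i, find the first later j with prices[j] < prices[i] and return j-i, else n-1-i.
import Mathlib
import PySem

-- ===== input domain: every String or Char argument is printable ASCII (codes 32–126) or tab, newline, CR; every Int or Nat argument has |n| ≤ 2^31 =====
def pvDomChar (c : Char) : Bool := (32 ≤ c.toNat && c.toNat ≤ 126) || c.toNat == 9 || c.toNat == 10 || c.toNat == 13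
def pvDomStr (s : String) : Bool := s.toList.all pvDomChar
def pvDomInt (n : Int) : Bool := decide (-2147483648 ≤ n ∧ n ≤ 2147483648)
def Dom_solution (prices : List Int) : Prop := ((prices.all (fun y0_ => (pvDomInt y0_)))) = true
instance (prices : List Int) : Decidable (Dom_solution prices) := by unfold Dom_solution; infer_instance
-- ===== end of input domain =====

-- B replaces A's monotonic index stack by a per-index forward scan (simpler, the standard first solution); same return value.


-- ===== PORT A =====
-- inner `while stack and prices[i] < prices[stack[-1]]` loop (stack head = top)
def popLoop (prices : List Int) (i : Nat) : List Nat → List Int → List Nat × List Int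
  | [], ans => ([], ans)
  | v :: rest, ans =>
    if prices.getD i 0 < prices.getD v 0 then
      popLoop prices i rest (ans.set v ((i : Int) - (v : Int)))
    else (v :: rest, ans)

def solution (prices : List Int) : List Int :=
  let n := prices.length
  let st := (List.range n).foldl
    (fun (s : List Nat × List Int) i =>
      let s' := popLoop prices i s.1 s.2
      (i :: s'.1, s'.2)) ([], List.replicate n 0)
  st.1.foldl (fun ans v => ans.set v ((n : Int) - 1 - (v : Int))) st.2

-- ===== PORT B =====
-- `first_drop(i)`: first j > i with prices[j] < prices[i], as a while loop on j
def firstDropFrom (prices : List Int) (p : Int) (j : Nat) : Option Nat :=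
  if j < prices.length then
    if prices.getD j 0 < p then some j else firstDropFrom prices p (j + 1)
  else none
termination_by prices.length - j

def solution_alt (prices : List Int) : List Int :=
  let n := prices.length
  (List.range n).map (fun i =>
    match firstDropFrom prices (prices.getD i 0) (i + 1) with
    | some j => (j : Int) - (i : Int)
    | none => (n : Int) - 1 - (i : Int))

-- ===== PRECONDITION & SPEC =====
def Spec_solution (prices : List Int) (out : List Int) : Prop := out = solution_alt prices
instance (prices : List Int) (out : List Int) : Decidable (Spec_solution prices out) := by unfold Spec_solution; infer_instance

-- ===== CLAIM (what is proved, stated in full; the proofs are below) =====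
def Claim_equal_solution : Prop := ∀ (prices : List Int), Dom_solution prices → Spec_solution prices (solution prices)

-- ===== LEMMAS AND PROOFS =====

-- value B computes at index i
def specF (prices : List Int) (i : Nat) : Int :=
  match firstDropFrom prices (prices.getD i 0) (i + 1) with
  | some j => (j : Int) - (i : Int)
  | none => (prices.length : Int) - 1 - (i : Int)

-- no strict price drop at any index j with v < j < i
def NoDrop (prices : List Int) (v i : Nat) : Prop :=
  ∀ j, v < j → j < i → ¬ prices.getD j 0 < prices.getD v 0

-- stack order relation: indices strictly decreasing, prices non-increasing, head→tail
def StkR (prices : List Int) (a b : Nat) : Prop :=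
  b < a ∧ prices.getD b 0 ≤ prices.getD a 0

-- loop invariant of A's main for-loop after processing indices < i
def LoopInv (prices : List Int) (i : Nat) (s : List Nat × List Int) : Prop :=
  List.Pairwise (StkR prices) s.1 ∧
  (∀ v, v ∈ s.1 ↔ v < i ∧ NoDrop prices v i) ∧
  s.2.length = prices.length ∧
  (∀ v, v < i → v ∉ s.1 → s.2.getD v 0 = specF prices v)

theorem firstDrop_none (prices : List Int) (p : Int) (j : Nat)
    (h : ∀ m, j ≤ m → m < prices.length → ¬ prices.getD m 0 < p) :
    firstDropFrom prices p j = none := by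
  rw [firstDropFrom]
  by_cases h1 : j < prices.length
  · simp only [h1, if_true, h j le_rfl h1, if_false]
    exact firstDrop_none prices p (j + 1) (fun m hm => h m (Nat.le_of_succ_le hm))
  · simp [h1]
termination_by prices.length - j

theorem firstDrop_some (prices : List Int) (p : Int) (j i : Nat)
    (hji : j ≤ i) (hin : i < prices.length)
    (h : ∀ m, j ≤ m → m < i → ¬ prices.getD m 0 < p)
    (hd : prices.getD i 0 < p) :
    firstDropFrom prices p j = some i := by
  rw [firstDropFrom]
  rcases Nat.lt_or_ge j i with hlt | hge
  · have h1 : j < prices.length := Nat.lt_of_lt_of_le hlt (Nat.le_of_lt hin)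
    simp only [h1, if_true, h j le_rfl hlt, if_false]
    exact firstDrop_some prices p (j + 1) i hlt hin (fun m hm => h m (Nat.le_of_succ_le hm)) hd
  · have hj : j = i := Nat.le_antisymm hji hge
    subst hj
    rw [if_pos hin, if_pos hd]
termination_by prices.length - j

-- a popped index v (NoDrop up to i, drop at i) has spec value i - v
theorem specF_pop (prices : List Int) (v i : Nat) (hin : i < prices.length)
    (hnd : NoDrop prices v i) (hd : prices.getD i 0 < prices.getD v 0) (hvi : v < i) :
    specF prices v = (i : Int) - (v : Int) := by
  unfold specF
  rw [firstDrop_some prices _ (v + 1) i hvi hin (fun m hm hmi => hnd m hm hmi) hd]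

-- a surviving index v (NoDrop up to n) has spec value n - 1 - v
theorem specF_none (prices : List Int) (v : Nat) (hnd : NoDrop prices v prices.length) :
    specF prices v = (prices.length : Int) - 1 - (v : Int) := by
  unfold specF
  rw [firstDrop_none prices _ (v + 1) (fun m hm hmn => hnd m hm hmn)]

-- what popLoop does to a well-formed state
theorem popLoop_spec (prices : List Int) (i : Nat) (hin : i < prices.length) :
    ∀ (s1 : List Nat) (ans : List Int),
    List.Pairwise (StkR prices) s1 →
    (∀ w ∈ s1, w < i ∧ NoDrop prices w i) →
    ans.length = prices.length →
    (∀ w, w < i → w ∉ s1 → ans.getD w 0 = specF prices w) →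
    List.Pairwise (StkR prices) (popLoop prices i s1 ans).1 ∧
    (∀ w, w ∈ (popLoop prices i s1 ans).1 ↔
        (w ∈ s1 ∧ ¬ prices.getD i 0 < prices.getD w 0)) ∧
    (popLoop prices i s1 ans).2.length = prices.length ∧
    (∀ w, w < i → w ∉ (popLoop prices i s1 ans).1 →
        (popLoop prices i s1 ans).2.getD w 0 = specF prices w)
  | [], ans => by
    intro _ _ hlen h4
    refine ⟨List.Pairwise.nil, ?_, hlen, ?_⟩
    · simp [popLoop]
    · simpa [popLoop] using h4
  | v :: rest, ans => by
    intro hpw h2 hlen h4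
    have hv := h2 v (by simp)
    by_cases hd : prices.getD i 0 < prices.getD v 0
    · -- pop v, set answer[v] := i - v, continue
      have hvrest : v ∉ rest := by
        intro hmem
        exact Nat.lt_irrefl v ((List.pairwise_cons.mp hpw).1 v hmem).1
      have hset : (ans.set v ((i : Int) - (v : Int))).getD v 0 = specF prices v := by
        rw [specF_pop prices v i hin hv.2 hd hv.1]
        have hvlen : v < ans.length := by rw [hlen]; exact Nat.lt_trans hv.1 hin
        simp [List.getD, List.getElem?_set_self (by exact hvlen)]
      have ih := popLoop_spec prices i hin rest (ans.set v ((i : Int) - (v : Int)))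
        (List.pairwise_cons.mp hpw).2
        (fun w hw => h2 w (List.mem_cons_of_mem _ hw))
        (by simpa using hlen)
        (by
          intro w hwi hwrest
          by_cases hwv : w = v
          · subst hwv; exact hset
          · have : (ans.set v ((i : Int) - (v : Int))).getD w 0 = ans.getD w 0 := by
              simp [List.getD, List.getElem?_set_ne (by exact fun h => hwv h.symm)]
            rw [this]
            exact h4 w hwi (by simp [hwv, hwrest]))
      have hstep : popLoop prices i (v :: rest) ans
          = popLoop prices i rest (ans.set v ((i : Int) - (v : Int))) := by
        rw [popLoop, if_pos hd]
      rw [hstep]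
      refine ⟨ih.1, ?_, ih.2.2.1, ih.2.2.2⟩
      intro w
      rw [ih.2.1 w]
      constructor
      · rintro ⟨hw, hnd⟩; exact ⟨List.mem_cons_of_mem _ hw, hnd⟩
      · rintro ⟨hw, hnd⟩
        rcases List.mem_cons.mp hw with h | h
        · exact absurd hd (h ▸ hnd)
        · exact ⟨h, hnd⟩
    · -- stop: nothing popped
      have hstep : popLoop prices i (v :: rest) ans = (v :: rest, ans) := by
        rw [popLoop, if_neg hd]
      rw [hstep]
      refine ⟨hpw, ?_, hlen, fun w hwi hw => h4 w hwi hw⟩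
      intro w
      constructor
      · intro hw
        refine ⟨hw, ?_⟩
        rcases List.mem_cons.mp hw with h | h
        · exact h ▸ hd
        · have hle : prices.getD w 0 ≤ prices.getD v 0 :=
            ((List.pairwise_cons.mp hpw).1 w h).2
          intro hlt
          exact hd (lt_of_lt_of_le hlt hle)
      · exact fun h => h.1

-- one step of the main for-loop preserves the invariant
theorem step_inv (prices : List Int) (i : Nat) (hin : i < prices.length)
    (s : List Nat × List Int) (h : LoopInv prices i s) :
    LoopInv prices (i + 1)
      (i :: (popLoop prices i s.1 s.2).1, (popLoop prices i s.1 s.2).2) := by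
  obtain ⟨hpw, hmem, hlen, hans⟩ := h
  obtain ⟨hpw', hmem', hlen', hans'⟩ :=
    popLoop_spec prices i hin s.1 s.2 hpw (fun w hw => (hmem w).mp hw) hlen hans
  have hlt : ∀ w ∈ (popLoop prices i s.1 s.2).1, w < i := by
    intro w hw
    exact ((hmem w).mp ((hmem' w).mp hw).1).1
  refine ⟨?_, ?_, hlen', ?_⟩
  · refine List.pairwise_cons.mpr ⟨?_, hpw'⟩
    intro w hw
    have h1 := (hmem' w).mp hw
    exact ⟨hlt w hw, not_lt.mp h1.2⟩
  · intro w
    constructor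
    · intro hw
      rcases List.mem_cons.mp hw with h | h
      · subst h
        exact ⟨Nat.lt_succ_self _, fun j hj1 hj2 => False.elim (by omega)⟩
      · have h1 := (hmem' w).mp h
        have h2 := (hmem w).mp h1.1
        refine ⟨Nat.lt_succ_of_lt h2.1, ?_⟩
        intro j hj1 hj2
        rcases Nat.lt_succ_iff_lt_or_eq.mp hj2 with hji | hji
        · exact h2.2 j hj1 hji
        · subst hji; exact h1.2
    · rintro ⟨hw1, hw2⟩
      rcases Nat.lt_succ_iff_lt_or_eq.mp hw1 with hwi | hwi
      · refine List.mem_cons_of_mem _ ((hmem' w).mpr ⟨(hmem w).mpr ⟨hwi, ?_⟩, hw2 i hwi (Nat.lt_succ_self _)⟩)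
        exact fun j hj1 hj2 => hw2 j hj1 (Nat.lt_succ_of_lt hj2)
      · subst hwi; exact List.mem_cons_self
  · intro w hwi hw
    have hwi' : w < i := by
      rcases Nat.lt_succ_iff_lt_or_eq.mp hwi with h | h
      · exact h
      · exact absurd (h ▸ List.mem_cons_self) hw
    exact hans' w hwi' (fun h => hw (List.mem_cons_of_mem _ h))

-- the main loop establishes the invariant up to i, for every i ≤ n
theorem loop_inv (prices : List Int) :
    ∀ i, i ≤ prices.length →
    LoopInv prices i ((List.range i).foldl
      (fun (s : List Nat × List Int) i =>
        let s' := popLoop prices i s.1 s.2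
        (i :: s'.1, s'.2)) ([], List.replicate prices.length 0)) := by
  intro i
  induction i with
  | zero =>
    intro _
    refine ⟨List.Pairwise.nil, by simp, by simp, by simp⟩
  | succ k ih =>
    intro hk
    rw [List.range_succ, List.foldl_append]
    exact step_inv prices k (Nat.lt_of_succ_le hk) _ (ih (Nat.le_of_succ_le hk))

-- the final while-loop fixes the remaining stack entries
theorem final_fold (prices : List Int) :
    ∀ (s1 : List Nat) (ans : List Int),
    (∀ v ∈ s1, v < prices.length ∧
        specF prices v = (prices.length : Int) - 1 - (v : Int)) →
    ans.length = prices.length →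
    (∀ v, v < prices.length → v ∉ s1 → ans.getD v 0 = specF prices v) →
    ∀ v, v < prices.length →
      (s1.foldl (fun a w => a.set w ((prices.length : Int) - 1 - (w : Int))) ans).getD v 0
        = specF prices v
  | [], ans => by
    intro _ _ h4 v hv
    simpa using h4 v hv (by simp)
  | w :: rest, ans => by
    intro h2 hlen h4
    have hw := h2 w (by simp)
    simp only [List.foldl_cons]
    refine final_fold prices rest (ans.set w ((prices.length : Int) - 1 - (w : Int)))
      (fun v hv => h2 v (List.mem_cons_of_mem _ hv)) (by simpa using hlen) ?_
    intro v hv hvrest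
    by_cases hvw : v = w
    · subst hvw
      rw [hw.2]
      have : v < ans.length := by rw [hlen]; exact hv
      simp [List.getD, List.getElem?_set_self this]
    · have : (ans.set w ((prices.length : Int) - 1 - (w : Int))).getD v 0 = ans.getD v 0 := by
        simp [List.getD, List.getElem?_set_ne (by exact fun h => hvw h.symm)]
      rw [this]
      exact h4 v hv (by simp [hvw, hvrest])

theorem foldl_set_length (xs : List Nat) (f : Nat → Int) :
    ∀ ans : List Int, (xs.foldl (fun a w => a.set w (f w)) ans).length = ans.length := by
  induction xs with
  | nil => intro ans; rfl
  | cons w rest ih => intro ans; simp [ih]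

theorem solution_eq_spec (prices : List Int) :
    solution prices = solution_alt prices := by
  obtain ⟨hpw, hmem, hlen, hans⟩ := loop_inv prices prices.length le_rfl
  set st := (List.range prices.length).foldl
      (fun (s : List Nat × List Int) i =>
        let s' := popLoop prices i s.1 s.2
        (i :: s'.1, s'.2)) ([], List.replicate prices.length 0) with hst
  have hsol : solution prices
      = st.1.foldl (fun ans v => ans.set v ((prices.length : Int) - 1 - (v : Int))) st.2 := by
    simp only [hst]; rfl
  have halt : solution_alt prices
      = (List.range prices.length).map (fun i =>
          match firstDropFrom prices (prices.getD i 0) (i + 1) with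
          | some j => (j : Int) - (i : Int)
          | none => (prices.length : Int) - 1 - (i : Int)) := rfl
  have hfin : ∀ v, v < prices.length →
      (st.1.foldl (fun a w => a.set w ((prices.length : Int) - 1 - (w : Int))) st.2).getD v 0
        = specF prices v := by
    refine final_fold prices st.1 st.2 ?_ hlen hans
    intro v hv
    have h := (hmem v).mp hv
    exact ⟨h.1, specF_none prices v h.2⟩
  have hlenf : (st.1.foldl (fun a w => a.set w ((prices.length : Int) - 1 - (w : Int))) st.2).length
      = prices.length := by rw [foldl_set_length, hlen]
  rw [hsol, halt]
  apply List.ext_getElem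
  · simpa using hlenf
  · intro v hv1 hv2
    have hvn : v < prices.length := by rwa [hlenf] at hv1
    rw [List.getElem_map, List.getElem_range, ← List.getD_eq_getElem _ 0 hv1, hfin v hvn]
    rfl

-- ===== VERDICT (by name: the statement is the Claim_ definition above) =====
theorem solution_spec : Claim_equal_solution := by
  intro prices _
  unfold Spec_solution
  exact solution_eq_spec prices
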